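-- pv_equiv track=rewrite | github.com/alishibli97/wildfire-lora-gfm | dataset.py | _group_files_by_event_id
-- ===== SOURCE A (Python) =====
-- from collections import defaultdict
--
-- def _group_files_by_event_id(files):
--     grouped_files = defaultdict(list)
--     for file in files:
--         parts = file.split('_')
--         if len(parts) >= 4:
--             event_id = f"{parts[2]}_{parts[3]}"
--             grouped_files[event_id].append(file)
--     return grouped_files
-- ===== SOURCE B (Python) =====
-- from collections import defaultdict
--
-- def _group_files_by_event_id(files):
--     def event_key(file):
--         parts = file.split('_')
--         return parts[2] + '_' + parts[3] if len(parts) >= 4 else None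
--
--     keyed = []
--     for f in files:
--         k = event_key(f)
--         if k is not None:
--             keyed.append((k, f))
--     order = list(dict.fromkeys(k for k, _ in keyed))
--     grouped = defaultdict(list)
--     for k in order:
--         grouped[k] = [f for kk, f in keyed if kk == k]
--     return grouped
-- ===== Notes on version B (the rewrite author's own statement) =====
-- stated objective: alternative
-- what changed: Replaces the single-pass defaultdict-append grouping with a key-extraction pass, an ordered key dedup via dict.fromkeys, and one per-key filter scan that builds each group's list at once.
import Mathlib
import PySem

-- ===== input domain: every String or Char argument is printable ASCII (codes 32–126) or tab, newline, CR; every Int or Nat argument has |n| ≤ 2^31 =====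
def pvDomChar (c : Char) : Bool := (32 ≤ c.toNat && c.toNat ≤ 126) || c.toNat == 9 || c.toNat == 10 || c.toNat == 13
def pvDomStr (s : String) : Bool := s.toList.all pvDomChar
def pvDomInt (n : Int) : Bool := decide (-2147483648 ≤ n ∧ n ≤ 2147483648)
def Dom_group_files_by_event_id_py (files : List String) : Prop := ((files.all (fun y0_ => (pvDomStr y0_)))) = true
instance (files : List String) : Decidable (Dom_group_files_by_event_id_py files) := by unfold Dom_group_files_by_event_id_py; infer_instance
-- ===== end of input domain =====

-- B groups by a key-extraction pass, an ordered dedup of the keys, and one filter per distinct key,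
-- instead of A's single-pass defaultdict append; alternative decomposition, same return value.

-- ===== PORT A =====
def group_files_by_event_id_py (files : List String) : List (String × List String) :=
  (files.foldl
    (fun grouped file =>
      let parts := (PySem.Str.split? file "_").getD []
      if parts.length ≥ 4 then
        let event_id := (PySem.List.pyGet? parts 2).getD "" ++ "_" ++ (PySem.List.pyGet? parts 3).getD ""
        grouped.modify event_id [] (· ++ [file])
      else grouped)
    PySem.Dict.empty).items

-- ===== PORT B =====
def pvEventKey (file : String) : Option String :=
  let parts := (PySem.Str.split? file "_").getD []
  if parts.length ≥ 4 then
    some ((PySem.List.pyGet? parts 2).getD "" ++ "_" ++ (PySem.List.pyGet? parts 3).getD "")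
  else none

def group_files_by_event_id_py_alt (files : List String) : List (String × List String) :=
  let keyed := files.filterMap (fun f => (pvEventKey f).map (fun k => (k, f)))
  let order := PySem.List.dedup (keyed.map (·.1))
  order.map (fun k => (k, (keyed.filter (fun p => p.1 == k)).map (·.2)))

-- ===== PRECONDITION & SPEC =====
def Spec_group_files_by_event_id_py (files : List String) (out : List (String × List String)) : Prop := out = group_files_by_event_id_py_alt files
instance (files : List String) (out : List (String × List String)) : Decidable (Spec_group_files_by_event_id_py files out) := by unfold Spec_group_files_by_event_id_py; infer_instance

-- ===== CLAIM (what is proved, stated in full; the proofs are below) =====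
def Claim_equal_group_files_by_event_id_py : Prop := ∀ (files : List String), Dom_group_files_by_event_id_py files → Spec_group_files_by_event_id_py files (group_files_by_event_id_py files)

-- ===== LEMMAS AND PROOFS =====

-- A's dict loop over `files` is the pair-grouping loop over B's keyed list.
theorem pv_foldl_eq_keyed (files : List String) (d : PySem.Dict String (List String)) :
    files.foldl
      (fun grouped file =>
        let parts := (PySem.Str.split? file "_").getD []
        if parts.length ≥ 4 then
          let event_id := (PySem.List.pyGet? parts 2).getD "" ++ "_" ++ (PySem.List.pyGet? parts 3).getD ""
          grouped.modify event_id [] (· ++ [file])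
        else grouped) d
    = (files.filterMap (fun f => (pvEventKey f).map (fun k => (k, f)))).foldl
        (fun grouped p => grouped.modify p.1 [] (· ++ [p.2])) d := by
  induction files generalizing d with
  | nil => rfl
  | cons f rest ih =>
    simp only [List.foldl_cons, List.filterMap_cons, pvEventKey]
    by_cases h : ((PySem.Str.split? f "_").getD []).length ≥ 4
    · simp only [if_pos h, Option.map_some, List.foldl_cons]
      exact ih _
    · simp only [if_neg h, Option.map_none]
      exact ih _

theorem group_files_spec_aux (files : List String) :
    group_files_by_event_id_py files = group_files_by_event_id_py_alt files := by
  unfold group_files_by_event_id_py group_files_by_event_id_py_alt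
  rw [pv_foldl_eq_keyed]
  set keyed := files.filterMap (fun f => (pvEventKey f).map (fun k => (k, f))) with hkeyed
  have hnd : (keyed.foldl (fun grouped p => grouped.modify p.1 [] (· ++ [p.2]))
      PySem.Dict.empty).keys.Nodup := by
    exact PySem.Dict.nodup_keys_foldl_modify_key keyed Prod.fst [] (fun d x => (· ++ [x.2]))
      PySem.Dict.empty PySem.Dict.nodup_keys_empty
  rw [PySem.Dict.items_eq_map_keys _ hnd []]
  have hkeys : (keyed.foldl (fun grouped p => grouped.modify p.1 [] (· ++ [p.2]))
      PySem.Dict.empty).keys = PySem.List.dedup (keyed.map (·.1)) := by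
    rw [PySem.Dict.keys_foldl_modify_key keyed Prod.fst [] (fun d x => (· ++ [x.2]))
      PySem.Dict.empty]
    simp [PySem.Dict.keys_empty, PySem.Set.update_nil_left]
  rw [hkeys]
  refine List.map_congr_left (fun k hk => ?_)
  rw [PySem.Dict.getD_foldl_modify_append]
  simp [PySem.Dict.getD_empty]

-- ===== VERDICT (by name: the statement is the Claim_ definition above) =====
theorem group_files_by_event_id_py_spec : Claim_equal_group_files_by_event_id_py := by
  intro files _
  unfold Spec_group_files_by_event_id_py
  exact group_files_spec_aux files
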